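-- pv_equiv track=rewrite | github.com/Scalas/Programmers | solution/sol42626.py | solution
-- ===== SOURCE A (Python) =====
-- from heapq import heappush, heappop, heapify
--
-- def solution(scoville, K):
--     answer = 0
--     heapify(scoville)
--     try:
--         # heap을 사용하여 가장 덜 매운 음식이 k 이상의 스코빌 지수를 가질 때 까지
--         # 가장 덜 매운 두 음식을 계속 섞어준다
--         while scoville and scoville[0] < K:
--             answer += 1
--             heappush(scoville, heappop(scoville) + (heappop(scoville) * 2))
--     # heappop에서 exception이 발생할 경우 모든 음식의 스코빌 지수를 k 이상으로 만들 수 없음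
--     except:
--         return -1
--
--     return answer
-- ===== SOURCE B (Python) =====
-- def solution(scoville, K):
--     # sorted-list variant: keep the pool sorted, mix the two front elements,
--     # insert the mix back at its ordered position (insort by hand)
--     s = sorted(scoville)
--     answer = 0
--     while s and s[0] < K:
--         if len(s) < 2:
--             return -1
--         a, b = s[0], s[1]
--         x = a + 2 * b
--         s = s[2:]
--         i = 0
--         while i < len(s) and s[i] <= x:
--             i += 1
--         s.insert(i, x)
--         answer += 1
--     return answer
-- ===== Notes on version B (the rewrite author's own statement) =====
-- stated objective: alternative
-- what changed: Replaces the binary min-heap (heapify/heappop/heappush) with a list kept sorted: mix the two front elements and re-insert the mix at its ordered position by a linear scan, returning -1 explicitly when only one element below K remains.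
import Mathlib
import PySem

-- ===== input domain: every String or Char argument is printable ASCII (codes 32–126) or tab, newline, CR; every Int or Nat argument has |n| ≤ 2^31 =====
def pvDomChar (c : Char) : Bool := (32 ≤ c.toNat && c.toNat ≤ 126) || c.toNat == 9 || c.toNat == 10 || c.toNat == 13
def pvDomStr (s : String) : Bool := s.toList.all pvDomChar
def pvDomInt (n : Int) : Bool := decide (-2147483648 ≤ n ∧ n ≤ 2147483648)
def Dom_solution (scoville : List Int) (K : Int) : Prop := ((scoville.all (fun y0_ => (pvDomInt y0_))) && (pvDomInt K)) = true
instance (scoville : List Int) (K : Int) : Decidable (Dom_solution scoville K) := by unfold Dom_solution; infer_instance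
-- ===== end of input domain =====

-- B replaces A's binary min-heap with a list kept sorted (hand insort); return-value equivalence only: A heap-mutates its argument, B does not mutate it.


-- ===== PORT A =====
-- heapq calls are ported by their extract-min semantics on the pool:
-- heappop = remove the minimum element, heappush = add an element.
def solutionGo (K : Int) (l : List Int) (ans : Int) : Int :=
  match h : PySem.List.min? l (fun x => x) with
  | none => ans                                   -- while condition false (empty)
  | some a =>
    if a < K then
      match h2 : PySem.List.min? (l.erase a) (fun x => x) with
      | none => -1                                -- second heappop raises IndexError
      | some b => solutionGo K ((l.erase a).erase b ++ [a + (b * 2)]) (ans + 1)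
    else ans
termination_by l.length
decreasing_by
  have ha : a ∈ l := PySem.List.min?_mem h
  have hb : b ∈ l.erase a := PySem.List.min?_mem h2
  have h1 : (l.erase a).length = l.length - 1 := List.length_erase_of_mem ha
  have h2' : ((l.erase a).erase b).length = (l.erase a).length - 1 := List.length_erase_of_mem hb
  have hpos : 0 < l.length := List.length_pos_of_mem ha
  have hpos2 : 0 < (l.erase a).length := List.length_pos_of_mem hb
  simp only [List.length_append, h2', h1, List.length_cons, List.length_nil]
  omega

def solution (scoville : List Int) (K : Int) : Int := solutionGo K scoville 0

-- ===== PORT B =====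
-- the hand-written insort scan of Source B: skip while s[i] ≤ x, insert there
def insSorted (x : Int) : List Int → List Int
  | [] => [x]
  | y :: ys => if y ≤ x then y :: insSorted x ys else x :: y :: ys

theorem length_insSorted (x : Int) (l : List Int) : (insSorted x l).length = l.length + 1 := by
  induction l with
  | nil => rfl
  | cons y ys ih => simp only [insSorted]; split <;> simp [ih]

def solutionAltGo (K : Int) : List Int → Int → Int
  | [], ans => ans
  | a :: rest, ans =>
    if a < K then
      match rest with
      | [] => -1
      | b :: rest2 => solutionAltGo K (insSorted (a + 2 * b) rest2) (ans + 1)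
    else ans
termination_by l => l.length
decreasing_by
  simp [length_insSorted]

def solution_alt (scoville : List Int) (K : Int) : Int :=
  solutionAltGo K (PySem.List.sorted scoville (fun x => x) false) 0

-- ===== PRECONDITION & SPEC =====
def Spec_solution (scoville : List Int) (K : Int) (out : Int) : Prop := out = solution_alt scoville K
instance (scoville : List Int) (K : Int) (out : Int) : Decidable (Spec_solution scoville K out) := by unfold Spec_solution; infer_instance

-- ===== CLAIM (what is proved, stated in full; the proofs are below) =====
def Claim_equal_solution : Prop := ∀ (scoville : List Int) (K : Int), Dom_solution scoville K → Spec_solution scoville K (solution scoville K)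

-- ===== LEMMAS AND PROOFS =====
theorem insSorted_perm (x : Int) (l : List Int) : (insSorted x l).Perm (x :: l) := by
  induction l with
  | nil => exact List.Perm.refl _
  | cons y ys ih =>
    simp only [insSorted]
    split
    · exact (ih.cons y).trans (List.Perm.swap x y ys)
    · exact List.Perm.refl _

theorem insSorted_sorted (x : Int) {l : List Int} (h : l.Pairwise (· ≤ ·)) :
    (insSorted x l).Pairwise (· ≤ ·) := by
  induction l with
  | nil => simp [insSorted]
  | cons y ys ih =>
    rcases List.pairwise_cons.mp h with ⟨hy, hys⟩
    simp only [insSorted]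
    split
    · refine List.pairwise_cons.mpr ⟨?_, ih hys⟩
      intro z hz
      rcases List.mem_cons.mp ((insSorted_perm x ys).mem_iff.mp hz) with rfl | hz'
      · assumption
      · exact hy _ hz'
    · next hyx =>
      refine List.pairwise_cons.mpr ⟨?_, h⟩
      intro z hz
      have hxy : x ≤ y := by omega
      rcases List.mem_cons.mp hz with rfl | hz'
      · exact hxy
      · exact hxy.trans (hy _ hz')

theorem min?_of_perm_sorted {lA : List Int} {b : Int} {t : List Int}
    (hp : lA.Perm (b :: t)) (hs : (b :: t).Pairwise (· ≤ ·)) :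
    PySem.List.min? lA (fun x => x) = some b := by
  have hb : b ∈ lA := hp.mem_iff.mpr (List.mem_cons_self ..)
  have hne : lA ≠ [] := by intro h; subst h; exact absurd hp.symm.length_eq (by simp)
  rcases hm : PySem.List.min? lA (fun x => x) with _ | m
  · exact absurd ((PySem.List.min?_eq_none_iff _ _).mp hm) hne
  · have hmem : m ∈ lA := PySem.List.min?_mem hm
    have hmin : m ≤ b := PySem.List.min?_isMin hm b hb
    have hbm : b ≤ m := by
      rcases List.mem_cons.mp (hp.mem_iff.mp hmem) with rfl | hmt
      · exact le_refl _
      · exact (List.pairwise_cons.mp hs).1 m hmt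
    rw [le_antisymm hmin hbm]

theorem altGo_nil (K : Int) (ans : Int) : solutionAltGo K [] ans = ans := by
  rw [solutionAltGo.eq_def]

theorem altGo_one (K a : Int) (ans : Int) :
    solutionAltGo K [a] ans = if a < K then -1 else ans := by
  rw [solutionAltGo.eq_def]

theorem altGo_two (K a b : Int) (rest2 : List Int) (ans : Int) :
    solutionAltGo K (a :: b :: rest2) ans =
      if a < K then solutionAltGo K (insSorted (a + 2 * b) rest2) (ans + 1) else ans := by
  rw [solutionAltGo.eq_def]

theorem go_none {K : Int} {lA : List Int} {ans : Int}
    (h : PySem.List.min? lA (fun x => x) = none) : solutionGo K lA ans = ans := by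
  rw [solutionGo]
  split
  · rfl
  · next a heq => simp [h] at heq

theorem go_some_none {K : Int} {lA : List Int} {ans a : Int}
    (h : PySem.List.min? lA (fun x => x) = some a)
    (h2 : PySem.List.min? (lA.erase a) (fun x => x) = none) :
    solutionGo K lA ans = if a < K then -1 else ans := by
  rw [solutionGo]
  split
  · next heq => simp [h] at heq
  · next a' heq =>
    rw [h] at heq
    injection heq with heq'
    subst heq'
    by_cases hK : a < K
    · simp only [if_pos hK]
      split
      · rfl
      · next b' heq2 => simp [h2] at heq2
    · simp [if_neg hK]

theorem go_some_some {K : Int} {lA : List Int} {ans a b : Int}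
    (h : PySem.List.min? lA (fun x => x) = some a)
    (h2 : PySem.List.min? (lA.erase a) (fun x => x) = some b) :
    solutionGo K lA ans =
      if a < K then solutionGo K ((lA.erase a).erase b ++ [a + b * 2]) (ans + 1) else ans := by
  rw [solutionGo]
  split
  · next heq => simp [h] at heq
  · next a' heq =>
    rw [h] at heq
    injection heq with heq'
    subst heq'
    by_cases hK : a < K
    · simp only [if_pos hK]
      split
      · next heq2 => simp [h2] at heq2
      · next b' heq2 =>
        rw [h2] at heq2
        injection heq2 with heq2'
        subst heq2'
        rfl
    · simp [if_neg hK]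

theorem go_eq (K : Int) (n : Nat) : ∀ (lA lB : List Int) (ans : Int),
    lA.length = n → lA.Perm lB → lB.Pairwise (· ≤ ·) →
    solutionGo K lA ans = solutionAltGo K lB ans := by
  induction n using Nat.strong_induction_on with
  | _ n ih =>
    intro lA lB ans hlen hp hs
    match lB with
    | [] =>
      have hA : lA = [] := List.Perm.eq_nil hp
      subst hA
      rw [go_none rfl, altGo_nil]
    | [b] =>
      have hmin : PySem.List.min? lA (fun x => x) = some b := min?_of_perm_sorted hp hs
      have hpe : (lA.erase b).Perm ([] : List Int) := by
        have := hp.erase b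
        simpa using this
      have he : lA.erase b = [] := List.Perm.eq_nil hpe
      rw [go_some_none hmin (by rw [he]; rfl), altGo_one]
    | b :: c :: t2 =>
      have hmin : PySem.List.min? lA (fun x => x) = some b := min?_of_perm_sorted hp hs
      have hpe : (lA.erase b).Perm (c :: t2) := by
        have := hp.erase b
        simpa using this
      have hst : (c :: t2).Pairwise (· ≤ ·) := (List.pairwise_cons.mp hs).2
      have hmin2 : PySem.List.min? (lA.erase b) (fun x => x) = some c :=
        min?_of_perm_sorted hpe hst
      rw [go_some_some hmin hmin2, altGo_two]
      by_cases hK : b < K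
      · simp only [if_pos hK]
        have hb : b ∈ lA := hp.mem_iff.mpr (List.mem_cons_self ..)
        have hc : c ∈ lA.erase b := hpe.mem_iff.mpr (List.mem_cons_self ..)
        have hperm' : ((lA.erase b).erase c ++ [b + c * 2]).Perm (insSorted (b + 2 * c) t2) := by
          -- (erase b).erase c ~ t2, so appending the mix ~ insSorted of the mix
          have h1 : ((lA.erase b).erase c).Perm t2 := by
            have := hpe.erase c
            simpa using this
          have h2 : ((lA.erase b).erase c ++ [b + c * 2]).Perm ((b + 2 * c) :: t2) := by
            have hx : b + c * 2 = b + 2 * c := by ring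
            rw [hx]
            exact (List.perm_append_singleton _ _).trans (h1.cons _)
          exact h2.trans (insSorted_perm _ _).symm
        have hlen' : ((lA.erase b).erase c ++ [b + c * 2]).length < n := by
          have e1 : (lA.erase b).length = lA.length - 1 := List.length_erase_of_mem hb
          have e2 : ((lA.erase b).erase c).length = (lA.erase b).length - 1 :=
            List.length_erase_of_mem hc
          have p1 : 0 < lA.length := List.length_pos_of_mem hb
          have p2 : 0 < (lA.erase b).length := List.length_pos_of_mem hc
          simp only [List.length_append, e2, e1, List.length_cons, List.length_nil]
          omega
        exact ih _ hlen' _ _ (ans + 1) rfl hperm' (insSorted_sorted _ (List.pairwise_cons.mp hst).2)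
      · simp [if_neg hK]

-- ===== VERDICT (by name: the statement is the Claim_ definition above) =====
theorem solution_spec : Claim_equal_solution := by
  intro scoville K _
  unfold Spec_solution solution solution_alt
  exact go_eq K scoville.length scoville _ 0 rfl
    (PySem.List.sorted_perm scoville (fun x => x) false).symm
    (PySem.List.sorted_pairwise scoville (fun x => x))
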